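-- pv_equiv track=rewrite | github.com/wokira/Python_projects_Sem1 | Kmap.py | rootList
-- ===== SOURCE A (Python) =====
-- import itertools
-- import copy
--
-- def rootList(s, dashCount):
-- 	"""
-- 	Finds the initial minterms and don't cares that the implicants are coming form.
-- 	Returns a list
-- 	"""
-- 	lst = list(itertools.product([0, 1], repeat=dashCount))
-- 	n = len(s)
-- 	l = []
-- 	for i in range (0, 2**dashCount):
-- 		x = 0
-- 		num = 0
-- 		temp = copy.deepcopy(s)
-- 		while x < n and x >= 0:
-- 			dash = temp.find('-', x)
-- 			if dash == -1:
-- 				break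
-- 			else:
-- 				temp = list(temp)
-- 				temp[dash] = lst[i][num] # Changing dash to 1 or 0
-- 				temp = ''.join(str(e) for e in temp) # list to string
-- 				num += 1
-- 				x = dash + 1
-- 		l.append(temp)
-- 	return l
-- ===== SOURCE B (Python) =====
-- import itertools
--
-- def rootList(s, dashCount):
--     """Pre-split s on '-' once, then interleave each bit combination between the parts."""
--     parts = s.split('-')
--     out = []
--     for combo in itertools.product([0, 1], repeat=dashCount):
--         res = parts[0]
--         for j in range(len(parts) - 1):
--             res += str(combo[j]) + parts[j + 1]
--         out.append(res)
--     return out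
-- ===== Notes on version B (the rewrite author's own statement) =====
-- stated objective: simpler
-- what changed: B splits the string on '-' once and builds each output by interleaving the combination's bits between the pre-split parts, instead of A's per-combination deep-copy plus repeated find/overwrite/rejoin scan of the whole string.
import Mathlib
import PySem

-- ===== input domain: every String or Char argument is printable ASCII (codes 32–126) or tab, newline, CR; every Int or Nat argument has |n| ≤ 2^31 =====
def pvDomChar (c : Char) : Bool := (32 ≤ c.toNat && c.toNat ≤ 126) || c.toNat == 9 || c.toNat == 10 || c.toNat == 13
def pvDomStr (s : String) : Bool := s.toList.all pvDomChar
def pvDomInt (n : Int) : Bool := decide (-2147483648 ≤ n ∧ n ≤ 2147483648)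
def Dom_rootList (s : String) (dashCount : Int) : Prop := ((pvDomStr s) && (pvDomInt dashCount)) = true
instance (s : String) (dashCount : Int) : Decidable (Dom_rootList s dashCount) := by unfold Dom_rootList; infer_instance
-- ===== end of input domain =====

-- B pre-splits the string on '-' once and interleaves each bit combination between the
-- parts, instead of A's per-combination find-and-overwrite rescan of the whole string
-- (objective: simpler decomposition).

-- ===== PORT A =====

-- list(itertools.product([0, 1], repeat=k)) in Python's (lexicographic) order;
-- tuples of ints become lists of ints under the type convention.
def pvCombos : Nat → List (List Int)
  | 0 => [[]]
  | k + 1 => [(0 : Int), 1].flatMap (fun b => (pvCombos k).map (b :: ·))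

-- str(e) applied to an element of lst[i], which is literally 0 or 1; '.getD 0' is a
-- totality guard for the IndexError Python raises when num/j is out of range
-- (excluded by Pre_rootList).
def pvDigit (b : Int) : Char := if b = 0 then '0' else '1'

-- the 'while x < n and x >= 0' loop of A: temp.find('-', x), overwrite, advance.
-- x : Nat so 'x >= 0' is automatic; fuel (n+1 at the call site) only makes the
-- recursion structural — it never runs out, since x strictly increases below n.
def rootListLoop (temp : List Char) (combo : List Int) (x num : Nat) (n : Nat) :
    Nat → List Char
  | 0 => temp
  | fuel + 1 =>
    if x < n then
      let dash := PySem.Chars.findFrom temp ['-'] (x : Int) none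
      if dash = -1 then temp
      else rootListLoop
            (temp.set dash.toNat (pvDigit ((PySem.List.pyGet? combo (num : Int)).getD 0)))
            combo (dash.toNat + 1) (num + 1) n fuel
    else temp

def rootList (s : String) (dashCount : Int) : List String :=
  let lst := pvCombos dashCount.toNat
  let n := s.toList.length
  (List.range (2 ^ dashCount.toNat)).foldl
    (fun l (i : Nat) =>
      l ++ [String.ofList (rootListLoop s.toList ((PySem.List.pyGet? lst (i : Int)).getD []) 0 0 n (n + 1))])
    []

-- ===== PORT B =====

-- s.split('-') ported as the library List.splitOn on the character list.
def rootList_alt (s : String) (dashCount : Int) : List String :=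
  let parts := s.toList.splitOn '-'
  (pvCombos dashCount.toNat).map (fun combo =>
    String.ofList
      ((List.range (parts.length - 1)).foldl
        (fun res (j : Nat) =>
          res ++ pvDigit ((PySem.List.pyGet? combo (j : Int)).getD 0) :: parts.getD (j + 1 : Nat) [])
        (parts.headD [])))

-- ===== PRECONDITION & SPEC =====
-- Pre_ excludes exactly the inputs where Python A raises: dashCount < 0
-- (ValueError from product(repeat=dashCount)) and strings with more dashes than
-- dashCount (IndexError on lst[i][num]); Python B raises on exactly the same inputs.
def Pre_rootList (s : String) (dashCount : Int) : Prop :=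
  0 ≤ dashCount ∧ (s.toList.count '-' : Int) ≤ dashCount
instance (s : String) (dashCount : Int) : Decidable (Pre_rootList s dashCount) := by
  unfold Pre_rootList; infer_instance

def pvWitness_rootList : String × Int := ("1-0-", 2)

def Spec_rootList (s : String) (dashCount : Int) (out : List String) : Prop := out = rootList_alt s dashCount
instance (s : String) (dashCount : Int) (out : List String) : Decidable (Spec_rootList s dashCount out) := by unfold Spec_rootList; infer_instance

-- ===== CLAIM (what is proved, stated in full; the proofs are below) =====
def Claim_equal_rootList : Prop := ∀ (s : String) (dashCount : Int), Dom_rootList s dashCount → Pre_rootList s dashCount → Spec_rootList s dashCount (rootList s dashCount)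

-- ===== LEMMAS AND PROOFS =====

-- Substitute the bits of `combo` (read from position `num` on, Python's fallback
-- behaviour folded into getD) for the dashes of `cs`, left to right.
def pvSubst (cs : List Char) (combo : List Int) (num : Nat) : List Char :=
  match cs with
  | [] => []
  | c :: rest =>
    if c = '-' then pvDigit ((PySem.List.pyGet? combo (num : Int)).getD 0) :: pvSubst rest combo (num + 1)
    else c :: pvSubst rest combo num

theorem pvSubst_clean (l r : List Char) (combo : List Int) (num : Nat)
    (h : '-' ∉ l) : pvSubst (l ++ r) combo num = l ++ pvSubst r combo num := by
  induction l with
  | nil => rfl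
  | cons c t ih =>
    simp only [List.mem_cons, not_or] at h
    simp [pvSubst, Ne.symm h.1, ih h.2]

theorem pvSubst_no_dash (l : List Char) (combo : List Int) (num : Nat)
    (h : '-' ∉ l) : pvSubst l combo num = l := by
  have := pvSubst_clean l [] combo num h
  simpa [pvSubst] using this

theorem pv_singleton_prefix {a : Char} {l : List Char} (t : List Char) (h : l = a :: t) :
    [a] <+: l := ⟨t, by simp [h]⟩

theorem pv_not_mem_take {l : List Char} {d : Nat}
    (h : ∀ i < d, ¬ [('-' : Char)] <+: l.drop i) : '-' ∉ l.take d := by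
  intro hm
  obtain ⟨i, hi, hgi⟩ := List.mem_iff_getElem.mp hm
  rw [List.length_take] at hi
  have hil : i < l.length := by omega
  have hid : i < d := by omega
  refine h i hid (pv_singleton_prefix (l.drop (i + 1)) ?_)
  rw [List.drop_eq_getElem_cons hil]
  rw [List.getElem_take] at hgi
  rw [hgi]

-- A's while-loop computes pvSubst on the unscanned suffix.
theorem rootListLoop_eq_subst (combo : List Int) :
    ∀ (fuel : Nat) (temp : List Char) (x num : Nat),
      x ≤ temp.length → temp.length - x < fuel →
      rootListLoop temp combo x num temp.length fuel
        = temp.take x ++ pvSubst (temp.drop x) combo num := by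
  intro fuel
  induction fuel with
  | zero => intro temp x num hx hf; omega
  | succ fuel ih =>
    intro temp x num hx hf
    by_cases hxn : x < temp.length
    · rw [rootListLoop, if_pos hxn]
      have hfind := PySem.Chars.findFrom_natCast temp ['-'] x hx
      set l := temp.drop x with hl
      set f := PySem.Chars.find l ['-'] with hfdef
      by_cases hneg : f = -1
      · rw [hfind, if_pos hneg]
        have hnd : ¬ [('-' : Char)] <:+: l := (PySem.Chars.find_eq_neg_one_iff l ['-']).mp hneg
        have hmem : '-' ∉ l := fun hm => hnd ((List.singleton_infix_iff _ _).mpr hm)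
        rw [pvSubst_no_dash l combo num hmem, List.take_append_drop]
        simp
      · have hf0 : 0 ≤ f := by
          have := PySem.Chars.neg_one_le_find l ['-']
          omega
        have hflen : f ≤ l.length := by
          have := PySem.Chars.find_le_length l ['-']
          simpa using this
        rw [hfind, if_neg hneg]
        have hdash : ¬ ((x : Int) + f = -1) := by omega
        rw [if_neg hdash]
        obtain ⟨hpre, hmin⟩ := PySem.Chars.find_spec (s := l) (sub := ['-']) hf0
        set d := f.toNat with hd
        obtain ⟨tl, htl⟩ := hpre
        have hcons : l.drop d = '-' :: tl := by simpa using htl.symm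
        have hdlen : d < l.length := by
          by_contra hge
          have : l.drop d = [] := List.drop_eq_nil_of_le (by omega)
          rw [this] at hcons; simp at hcons
        have hllen : l.length = temp.length - x := by simp [hl]
        have hxd : x + d < temp.length := by omega
        have htoNat : ((x : Int) + f).toNat = x + d := by omega
        rw [htoNat]
        set c := pvDigit ((PySem.List.pyGet? combo (num : Int)).getD 0) with hc
        have hset : temp.set (x + d) c
            = (temp.take x ++ l.take d ++ [c]) ++ temp.drop (x + d + 1) := by
          rw [List.set_eq_take_append_cons_drop, if_pos hxd]
          have htka : temp.take (x + d) = temp.take x ++ l.take d := by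
            rw [List.take_add]
          simp [htka]
        have hlenpre : (temp.take x ++ l.take d ++ [c]).length = x + d + 1 := by
          simp [List.length_take]
          omega
        have ihcall := ih (temp.set (x + d) c) (x + d + 1) (num + 1)
          (by rw [List.length_set]; omega) (by rw [List.length_set]; omega)
        rw [List.length_set] at ihcall
        rw [ihcall]
        have hdrop' : (temp.set (x + d) c).drop (x + d + 1) = temp.drop (x + d + 1) := by
          rw [hset, ← hlenpre, List.drop_left]
        have htake' : (temp.set (x + d) c).take (x + d + 1) = temp.take x ++ l.take d ++ [c] := by
          rw [hset, ← hlenpre, List.take_left]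
        rw [hdrop', htake']
        have hdropxd : temp.drop (x + d + 1) = l.drop (d + 1) := by
          simp [hl, List.drop_drop]
          omega
        have hnotmem : '-' ∉ l.take d := pv_not_mem_take (fun i hi => hmin i (by omega))
        have hsub : pvSubst l combo num
            = l.take d ++ c :: pvSubst (l.drop (d + 1)) combo (num + 1) := by
          conv_lhs => rw [← List.take_append_drop d l, hcons]
          rw [pvSubst_clean _ _ _ _ hnotmem]
          have : tl = l.drop (d + 1) := by
            have := congrArg (List.drop 1) hcons
            simpa [List.drop_drop, Nat.add_comm] using this.symm
          simp [pvSubst, hc, this]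
        rw [hsub, hdropxd]
        simp
    · rw [rootListLoop, if_neg hxn]
      have hxe : x = temp.length := by omega
      rw [hxe]
      simp [pvSubst]

-- Interleaving the parts of the split with the bits, B's building order.
def pvJoin (combo : List Int) (num : Nat) : List (List Char) → List Char
  | [] => []
  | [p] => p
  | p :: q :: ps =>
    p ++ pvDigit ((PySem.List.pyGet? combo (num : Int)).getD 0) :: pvJoin combo (num + 1) (q :: ps)

theorem pvJoin_cons_cons (combo : List Int) (num : Nat) (c : Char) (q : List Char)
    (ps : List (List Char)) :
    pvJoin combo num ((c :: q) :: ps) = c :: pvJoin combo num (q :: ps) := by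
  cases ps <;> rfl

theorem pv_splitOn_ne_nil (cs : List Char) : cs.splitOn '-' ≠ [] := by
  simp [List.splitOn]
  exact List.splitOnP_ne_nil _ _

theorem pvJoin_splitOn (combo : List Int) :
    ∀ (cs : List Char) (num : Nat), pvJoin combo num (cs.splitOn '-') = pvSubst cs combo num := by
  intro cs
  induction cs with
  | nil => intro num; simp [List.splitOn, List.splitOnP_nil, pvJoin, pvSubst]
  | cons c rest ih =>
    intro num
    obtain ⟨q, ps, hqps⟩ := List.exists_cons_of_ne_nil (pv_splitOn_ne_nil rest)
    by_cases hc : c = '-'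
    · subst hc
      simp only [List.splitOn, List.splitOnP_cons, beq_self_eq_true, if_true] at *
      rw [hqps]
      simp only [pvJoin]
      rw [← hqps, ih (num + 1)]
      simp [pvSubst]
    · simp only [List.splitOn, List.splitOnP_cons] at *
      have hbeq : (c == '-') = false := beq_eq_false_iff_ne.mpr hc
      rw [hbeq]
      simp only [if_neg Bool.false_ne_true]
      rw [hqps]
      simp only [List.modifyHead]
      rw [pvJoin_cons_cons, ← hqps, ih num]
      simp [pvSubst, hc]

theorem pv_foldB_gen (combo : List Int) :
    ∀ (ps : List (List Char)) (p acc : List Char) (num : Nat),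
      (List.range ps.length).foldl
          (fun res (j : Nat) =>
            res ++ pvDigit ((PySem.List.pyGet? combo ((num + j : Nat) : Int)).getD 0) :: ps.getD j [])
          (acc ++ p)
        = acc ++ pvJoin combo num (p :: ps) := by
  intro ps
  induction ps with
  | nil => intro p acc num; simp [pvJoin]
  | cons q qs ih =>
    intro p acc num
    rw [List.length_cons, List.range_succ_eq_map, List.foldl_cons, List.foldl_map]
    have hstep : (acc ++ p) ++ pvDigit ((PySem.List.pyGet? combo ((num + 0 : Nat) : Int)).getD 0)
          :: (q :: qs).getD 0 []
        = (acc ++ (p ++ [pvDigit ((PySem.List.pyGet? combo ((num : Nat) : Int)).getD 0)])) ++ q := by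
      simp
    rw [hstep]
    have hfun : (fun (res : List Char) (j : Nat) =>
          res ++ pvDigit ((PySem.List.pyGet? combo ((num + Nat.succ j : Nat) : Int)).getD 0)
            :: (q :: qs).getD (Nat.succ j) [])
        = (fun (res : List Char) (j : Nat) =>
          res ++ pvDigit ((PySem.List.pyGet? combo (((num + 1) + j : Nat) : Int)).getD 0)
            :: qs.getD j []) := by
      funext res j
      have : num + Nat.succ j = (num + 1) + j := by omega
      rw [this]
      rfl
    rw [hfun, ih q _ (num + 1)]
    cases qs <;> simp [pvJoin]

-- B's indexed fold over the split parts also computes pvSubst.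
theorem foldB_eq_subst (cs : List Char) (combo : List Int) :
    (List.range ((cs.splitOn '-').length - 1)).foldl
        (fun res (j : Nat) =>
          res ++ pvDigit ((PySem.List.pyGet? combo (j : Int)).getD 0) :: (cs.splitOn '-').getD (j + 1 : Nat) [])
        ((cs.splitOn '-').headD [])
      = pvSubst cs combo 0 := by
  obtain ⟨p, ps, hpps⟩ := List.exists_cons_of_ne_nil (pv_splitOn_ne_nil cs)
  rw [← pvJoin_splitOn combo cs 0, hpps]
  have hgen := pv_foldB_gen combo ps p [] 0
  simp only [List.nil_append, Nat.zero_add] at hgen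
  have hfun : (fun (res : List Char) (j : Nat) =>
        res ++ pvDigit ((PySem.List.pyGet? combo (j : Int)).getD 0) :: (p :: ps).getD (j + 1 : Nat) [])
      = (fun (res : List Char) (j : Nat) =>
        res ++ pvDigit ((PySem.List.pyGet? combo (j : Int)).getD 0) :: ps.getD j []) := by
    funext res j; rfl
  simp only [List.length_cons, Nat.add_sub_cancel, hfun]
  exact hgen

theorem length_pvCombos (k : Nat) : (pvCombos k).length = 2 ^ k := by
  induction k with
  | zero => rfl
  | succ k ih => simp [pvCombos, ih]; ring

theorem foldl_range_index_map {α β : Type} (l : List α) (d : α) (f : α → β) :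
    ∀ (n : Nat), n ≤ l.length →
      (List.range n).foldl (fun r (i : Nat) => r ++ [f ((PySem.List.pyGet? l (i : Int)).getD d)]) []
        = (l.take n).map f := by
  intro n
  induction n with
  | zero => intro _; simp
  | succ n ih =>
    intro hn
    rw [List.range_succ, List.foldl_append, ih (by omega), List.foldl_cons, List.foldl_nil]
    have hlt : n < l.length := by omega
    rw [PySem.List.pyGet?_natCast, List.getElem?_eq_getElem hlt]
    rw [List.take_add_one, List.getElem?_eq_getElem hlt, List.map_append]
    simp

-- ===== VERDICT (by name: the statement is the Claim_ definition above) =====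
theorem rootList_spec : Claim_equal_rootList := by
  intro s dashCount _ _
  unfold Spec_rootList
  simp only [rootList, rootList_alt]
  have hA := foldl_range_index_map (pvCombos dashCount.toNat) []
    (fun combo => String.ofList (rootListLoop s.toList combo 0 0 s.toList.length (s.toList.length + 1)))
    (pvCombos dashCount.toNat).length (le_refl _)
  rw [List.take_length] at hA
  rw [← length_pvCombos, hA]
  apply List.map_congr_left
  intro combo _
  congr 1
  rw [rootListLoop_eq_subst combo (s.toList.length + 1) s.toList 0 0 (by omega) (by omega)]
  rw [foldB_eq_subst s.toList combo]
  simp
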